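-- pv_equiv track=rewrite | github.com/Mxo01/AdventOfCode | 2024/Day 22 - Monkey Market/1.py | generate_secret_numbers
-- ===== SOURCE A (Python) =====
-- def generate_secret_numbers(starting_secret_numbers):
--     secret_numbers = []
--
--     for secret_number in starting_secret_numbers:
--         next_secret_number = secret_number
--
--         for _ in range(2000):
--             next_secret_number = generate_next_secret_number(next_secret_number)
--
--         secret_numbers.append(next_secret_number)
--
--     return secret_numbers
--
-- def generate_next_secret_number(secret_number):
--     secret_number = prune(mix(secret_number * 64, secret_number))
--     secret_number = prune(mix(secret_number // 32, secret_number))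
--     secret_number = prune(mix(secret_number * 2048, secret_number))
--
--     return secret_number
--
-- def mix(a, b):
--     return a ^ b
--
-- def prune(a):
--     return a % 16777216
-- ===== SOURCE B (Python) =====
-- # B: one PRNG step is a GF(2)-linear map on 24 bits; precompute its 2000th power
-- # as a 24-column bit matrix by binary exponentiation, then apply it to each number.
--
-- MOD = 16777216
-- MASK = MOD - 1
--
--
-- def _step(x):
--     x = (x ^ (x << 6)) & MASK
--     x = (x ^ (x >> 5)) & MASK
--     x = (x ^ (x << 11)) & MASK
--     return x
--
--
-- def _apply(cols, x):
--     r = 0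
--     for j in range(24):
--         if (x >> j) & 1:
--             r ^= cols[j]
--     return r
--
--
-- def _matmul(a, b):
--     return [_apply(a, c) for c in b]
--
--
-- def _matpow(p, q, e):
--     while e:
--         if e & 1:
--             p = _matmul(q, p)
--         q = _matmul(q, q)
--         e >>= 1
--     return p
--
--
-- def generate_secret_numbers(starting_secret_numbers):
--     identity = [1 << j for j in range(24)]
--     step_cols = [_step(1 << j) for j in range(24)]
--     power = _matpow(identity, step_cols, 2000)
--     return [_apply(power, x % MOD) for x in starting_secret_numbers]
-- ===== Notes on version B (the rewrite author's own statement) =====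
-- stated objective: faster
-- what changed: Each 2000-step PRNG iteration per number is replaced by one application of the GF(2)-linear step map's 2000th power, precomputed once as a 24-column bit matrix by binary exponentiation.
import Mathlib
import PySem

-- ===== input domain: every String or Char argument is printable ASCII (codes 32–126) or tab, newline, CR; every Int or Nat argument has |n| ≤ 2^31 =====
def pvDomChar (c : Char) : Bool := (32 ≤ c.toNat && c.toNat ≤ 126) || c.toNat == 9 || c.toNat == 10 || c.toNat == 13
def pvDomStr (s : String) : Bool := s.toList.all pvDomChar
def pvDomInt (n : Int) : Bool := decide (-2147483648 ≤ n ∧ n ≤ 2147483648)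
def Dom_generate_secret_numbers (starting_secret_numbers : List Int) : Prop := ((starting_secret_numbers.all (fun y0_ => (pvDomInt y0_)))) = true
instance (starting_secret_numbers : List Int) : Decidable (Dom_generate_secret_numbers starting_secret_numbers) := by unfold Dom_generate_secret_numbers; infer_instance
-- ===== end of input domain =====

-- B replaces the 2000 per-number PRNG steps by one application of the precomputed
-- 2000th power (binary exponentiation) of the GF(2)-linear step map on 24 bits (faster).

-- ===== PORT A =====
def pv_mix (a b : Int) : Int := PySem.Int.bxor a b

def pv_prune (a : Int) : Int := PySem.Int.mod a 16777216

def pv_next (secret_number : Int) : Int :=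
  let s1 := pv_prune (pv_mix (secret_number * 64) secret_number)
  let s2 := pv_prune (pv_mix (PySem.Int.floordiv s1 32) s1)
  pv_prune (pv_mix (s2 * 2048) s2)

def generate_secret_numbers (starting_secret_numbers : List Int) : List Int :=
  starting_secret_numbers.foldl
    (fun secret_numbers secret_number =>
      secret_numbers ++ [(List.range 2000).foldl (fun s _ => pv_next s) secret_number])
    []

-- ===== PORT B =====
-- Source B's bit masks are Python ints that are always nonnegative; they are carried as Nat.
def bMOD : Nat := 16777216
def bMASK : Nat := bMOD - 1

def b_step (x : Nat) : Nat :=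
  let x1 := (x ^^^ (x <<< 6)) &&& bMASK
  let x2 := (x1 ^^^ (x1 >>> 5)) &&& bMASK
  (x2 ^^^ (x2 <<< 11)) &&& bMASK

def b_apply (cols : List Nat) (x : Nat) : Nat :=
  (List.range 24).foldl (fun r j => if (x >>> j) &&& 1 = 1 then r ^^^ cols.getD j 0 else r) 0

def b_matmul (a b : List Nat) : List Nat := b.map (b_apply a)

def b_matpow (p q : List Nat) (e : Nat) : List Nat :=
  if e = 0 then p
  else b_matpow (if e &&& 1 = 1 then b_matmul q p else p) (b_matmul q q) (e >>> 1)
termination_by e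
decreasing_by simpa [Nat.shiftRight_succ] using Nat.div_lt_self (Nat.pos_of_ne_zero (by assumption)) one_lt_two

def generate_secret_numbers_alt (starting_secret_numbers : List Int) : List Int :=
  let identity := (List.range 24).map (fun j => 1 <<< j)
  let step_cols := (List.range 24).map (fun j => b_step (1 <<< j))
  let power := b_matpow identity step_cols 2000
  starting_secret_numbers.map
    (fun x => ((b_apply power (PySem.Int.mod x 16777216).toNat : Nat) : Int))

-- ===== PRECONDITION & SPEC =====
def Spec_generate_secret_numbers (starting_secret_numbers : List Int) (out : List Int) : Prop := out = generate_secret_numbers_alt starting_secret_numbers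
instance (starting_secret_numbers : List Int) (out : List Int) : Decidable (Spec_generate_secret_numbers starting_secret_numbers out) := by unfold Spec_generate_secret_numbers; infer_instance

-- ===== CLAIM (what is proved, stated in full; the proofs are below) =====
def Claim_equal_generate_secret_numbers : Prop := ∀ (starting_secret_numbers : List Int), Dom_generate_secret_numbers starting_secret_numbers → Spec_generate_secret_numbers starting_secret_numbers (generate_secret_numbers starting_secret_numbers)

-- ===== LEMMAS AND PROOFS =====

-- xor commutes with truncation to the low n bits (Nat)
theorem pv_xor_mod_pow (x y n : Nat) : (x ^^^ y) % 2 ^ n = x % 2 ^ n ^^^ y % 2 ^ n := by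
  rw [← Nat.and_two_pow_sub_one_eq_mod, ← Nat.and_two_pow_sub_one_eq_mod,
    ← Nat.and_two_pow_sub_one_eq_mod, Nat.and_xor_distrib_right]

-- xor with the all-ones mask is complement within n bits
theorem pv_xor_mask (n k : Nat) (h : k < 2 ^ n) : k ^^^ (2 ^ n - 1) = 2 ^ n - 1 - k := by
  have h1 : ((BitVec.ofNat n k) ^^^ (BitVec.allOnes n)).toNat = k ^^^ (2 ^ n - 1) := by
    rw [BitVec.toNat_xor, BitVec.toNat_allOnes, BitVec.toNat_ofNat, Nat.mod_eq_of_lt h]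
  rw [BitVec.xor_allOnes, BitVec.toNat_not, BitVec.toNat_ofNat, Nat.mod_eq_of_lt h] at h1
  omega

-- recursion-friendly description of Source B's column application loop
def pv_applyR (cs : List Nat) (x : Nat) : Nat :=
  match cs with
  | [] => 0
  | c :: cs => (if x % 2 = 1 then c else 0) ^^^ pv_applyR cs (x / 2)

theorem pv_applyR_zero (cs : List Nat) : pv_applyR cs 0 = 0 := by
  induction cs with
  | nil => rfl
  | cons c cs ih => simp [pv_applyR, ih]

theorem pv_applyR_append (l : List Nat) (c : Nat) (x : Nat) :
    pv_applyR (l ++ [c]) x = pv_applyR l x ^^^ (if (x >>> l.length) % 2 = 1 then c else 0) := by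
  induction l generalizing x with
  | nil => simp [pv_applyR]
  | cons a l ih =>
    have hs : (x / 2) >>> l.length = x >>> (l.length + 1) := by
      rw [← Nat.shiftRight_one, ← Nat.shiftRight_add, Nat.add_comm]
    simp only [List.cons_append, pv_applyR, ih, List.length_cons, Nat.xor_assoc, hs]
    rfl

theorem pv_b_apply_gen (cs : List Nat) (x : Nat) (k : Nat) :
    (List.range k).foldl (fun r j => if (x >>> j) &&& 1 = 1 then r ^^^ cs.getD j 0 else r) 0
      = pv_applyR (cs.take k) x := by
  induction k with
  | zero => simp [pv_applyR]
  | succ k ih =>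
    rw [List.range_succ, List.foldl_append, ih]
    by_cases hk : k < cs.length
    · rw [List.take_add_one, List.getElem?_eq_getElem hk]
      simp only [Option.toList_some, List.foldl_cons, List.foldl_nil]
      rw [pv_applyR_append, List.length_take, Nat.min_eq_left (le_of_lt hk),
        List.getD_eq_getElem cs 0 hk, Nat.and_one_is_mod]
      split <;> simp
    · have hle : cs.length ≤ k := le_of_not_gt hk
      rw [List.take_of_length_le hle, List.take_of_length_le (le_trans hle (Nat.le_succ k))]
      have hnone : cs[k]? = none := List.getElem?_eq_none (by simpa using hle)
      simp [List.getD, hnone]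

theorem pv_b_apply_eq (cs : List Nat) (x : Nat) : b_apply cs x = pv_applyR (cs.take 24) x :=
  pv_b_apply_gen cs x 24

theorem pv_applyR_xor (cs : List Nat) (x y : Nat) :
    pv_applyR cs (x ^^^ y) = pv_applyR cs x ^^^ pv_applyR cs y := by
  induction cs generalizing x y with
  | nil => simp [pv_applyR]
  | cons c cs ih =>
    have h2 : (x ^^^ y) % 2 = x % 2 ^^^ y % 2 := by simpa using pv_xor_mod_pow x y 1
    have hd : (x ^^^ y) / 2 = x / 2 ^^^ y / 2 := by
      simpa [Nat.shiftRight_one] using Nat.shiftRight_xor_distrib (a := x) (b := y) (i := 1)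
    simp only [pv_applyR, h2, hd, ih]
    rcases Nat.mod_two_eq_zero_or_one x with hx | hx <;>
      rcases Nat.mod_two_eq_zero_or_one y with hy | hy <;>
        simp [hx, hy, Nat.xor_comm, Nat.xor_left_comm, Nat.xor_self]

theorem pv_applyR_map (g : Nat → Nat) (hg0 : g 0 = 0)
    (hgx : ∀ a b, g (a ^^^ b) = g a ^^^ g b) (cs : List Nat) (x : Nat) :
    pv_applyR (cs.map g) x = g (pv_applyR cs x) := by
  induction cs generalizing x with
  | nil => simp [pv_applyR, hg0]
  | cons c cs ih =>
    have hif : (if x % 2 = 1 then g c else 0) = g (if x % 2 = 1 then c else 0) := by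
      split <;> simp [hg0]
    rw [List.map_cons]
    simp only [pv_applyR, ih, hif, ← hgx]

theorem pv_mod_xor_div (x : Nat) : x % 2 ^^^ 2 * (x / 2) = x := by
  rcases Nat.mod_two_eq_zero_or_one x with h | h
  · rw [h, Nat.zero_xor]; omega
  · rw [h, Nat.xor_comm, Nat.xor_one_of_even (even_two_mul _)]; omega

theorem pv_applyR_basis (k : Nat) (L : Nat → Nat) (h0 : L 0 = 0)
    (hx : ∀ a b, L (a ^^^ b) = L a ^^^ L b) (x : Nat) (hlt : x < 2 ^ k) :
    pv_applyR ((List.range k).map (fun j => L (1 <<< j))) x = L x := by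
  induction k generalizing L x with
  | zero =>
    have hx0 : x = 0 := by simpa using hlt
    subst hx0; simpa [pv_applyR] using h0.symm
  | succ k ih =>
    rw [List.range_succ_eq_map, List.map_cons, List.map_map]
    have hmap : List.map ((fun j => L (1 <<< j)) ∘ Nat.succ) (List.range k)
        = List.map (fun j => (fun y => L (2 * y)) (1 <<< j)) (List.range k) := by
      refine List.map_congr_left fun j _ => ?_
      simp [Function.comp, Nat.shiftLeft_succ]
    have h2mul : ∀ a b : Nat, 2 * (a ^^^ b) = 2 * a ^^^ 2 * b := by
      intro a b
      have := Nat.shiftLeft_xor_distrib (a := a) (b := b) (i := 1)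
      simpa [Nat.shiftLeft_succ, Nat.shiftLeft_zero] using this
    have hL' : ∀ a b : Nat, (fun y => L (2 * y)) (a ^^^ b)
        = (fun y => L (2 * y)) a ^^^ (fun y => L (2 * y)) b := by
      intro a b; simp only [h2mul]; exact hx _ _
    have hdiv : x / 2 < 2 ^ k := by
      have hps : (2:Nat) ^ (k+1) = 2 ^ k * 2 := pow_succ 2 k
      omega
    rw [hmap]
    simp only [pv_applyR]
    rw [ih (fun y => L (2 * y)) (by simpa using h0) hL' (x / 2) hdiv]
    have hhead : (if x % 2 = 1 then L (1 <<< 0) else 0) = L (x % 2) := by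
      rcases Nat.mod_two_eq_zero_or_one x with h | h <;> simp [h, h0]
    rw [hhead, ← hx, pv_mod_xor_div]

theorem pv_b_apply_zero (cs : List Nat) : b_apply cs 0 = 0 := by
  rw [pv_b_apply_eq]; exact pv_applyR_zero _

theorem pv_b_apply_xor (cs : List Nat) (x y : Nat) :
    b_apply cs (x ^^^ y) = b_apply cs x ^^^ b_apply cs y := by
  rw [pv_b_apply_eq, pv_b_apply_eq, pv_b_apply_eq]; exact pv_applyR_xor _ _ _

theorem pv_matmul_sem (a b : List Nat) (x : Nat) :
    b_apply (b_matmul a b) x = b_apply a (b_apply b x) := by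
  rw [pv_b_apply_eq (b_matmul a b), b_matmul, ← List.map_take,
    pv_applyR_map (b_apply a) (pv_b_apply_zero a) (pv_b_apply_xor a), ← pv_b_apply_eq]

theorem pv_matpow_sem (e : Nat) (p q : List Nat) (x : Nat) :
    b_apply (b_matpow p q e) x = (b_apply q)^[e] (b_apply p x) := by
  induction e using Nat.strong_induction_on generalizing p q x with
  | _ e ih =>
    rw [b_matpow]
    by_cases h0 : e = 0
    · simp [h0]
    · rw [if_neg h0]
      have hlt : e / 2 < e := Nat.div_lt_self (Nat.pos_of_ne_zero h0) one_lt_two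
      rw [Nat.shiftRight_one, ih (e / 2) hlt]
      have hq : b_apply (b_matmul q q) = (b_apply q) ∘ (b_apply q) :=
        funext fun y => pv_matmul_sem q q y
      have htwo : (b_apply q) ∘ (b_apply q) = (b_apply q)^[2] := by
        funext y; simp [Function.iterate_succ_apply]
      rw [hq, htwo, ← Function.iterate_mul]
      rw [Nat.and_one_is_mod]
      rcases Nat.mod_two_eq_zero_or_one e with he | he
      · rw [if_neg (by omega)]
        have h2e : 2 * (e / 2) = e := by omega
        rw [h2e]
      · rw [if_pos he, pv_matmul_sem, ← Function.iterate_succ_apply]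
        have h2e : (2 * (e / 2)).succ = e := by omega
        rw [h2e]

theorem pv_step_zero : b_step 0 = 0 := by decide

theorem pv_lin_shl (s m a b : Nat) :
    ((a ^^^ b) ^^^ (a ^^^ b) <<< s) &&& m = ((a ^^^ a <<< s) &&& m) ^^^ ((b ^^^ b <<< s) &&& m) := by
  rw [Nat.shiftLeft_xor_distrib, ← Nat.and_xor_distrib_right]
  congr 1
  simp [Nat.xor_comm, Nat.xor_left_comm]

theorem pv_lin_shr (s m a b : Nat) :
    ((a ^^^ b) ^^^ (a ^^^ b) >>> s) &&& m = ((a ^^^ a >>> s) &&& m) ^^^ ((b ^^^ b >>> s) &&& m) := by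
  rw [Nat.shiftRight_xor_distrib, ← Nat.and_xor_distrib_right]
  congr 1
  simp [Nat.xor_comm, Nat.xor_left_comm]

theorem pv_step_xor (a b : Nat) : b_step (a ^^^ b) = b_step a ^^^ b_step b := by
  simp only [b_step]
  rw [pv_lin_shl 6 bMASK a b, pv_lin_shr 5 bMASK _ _, pv_lin_shl 11 bMASK _ _]

theorem pv_step_lt (x : Nat) : b_step x < 2 ^ 24 := by
  have h : b_step x ≤ bMASK := by
    simp only [b_step]; exact Nat.and_le_right
  have h2 : bMASK < 2 ^ 24 := by norm_num [bMASK, bMOD]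
  omega

theorem pv_apply_identity (x : Nat) (h : x < 2 ^ 24) :
    b_apply ((List.range 24).map (fun j => 1 <<< j)) x = x := by
  rw [pv_b_apply_eq, List.take_of_length_le (by simp)]
  exact pv_applyR_basis 24 id rfl (fun a b => rfl) x h

theorem pv_apply_stepcols (x : Nat) (h : x < 2 ^ 24) :
    b_apply ((List.range 24).map (fun j => b_step (1 <<< j))) x = b_step x := by
  rw [pv_b_apply_eq, List.take_of_length_le (by simp)]
  exact pv_applyR_basis 24 b_step pv_step_zero pv_step_xor x h

theorem pv_iter_stepcols (n : Nat) (x : Nat) (h : x < 2 ^ 24) :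
    (b_apply ((List.range 24).map (fun j => b_step (1 <<< j))))^[n] x = b_step^[n] x := by
  induction n generalizing x with
  | zero => rfl
  | succ n ih =>
    rw [Function.iterate_succ_apply, Function.iterate_succ_apply,
      pv_apply_stepcols x h, ih (b_step x) (pv_step_lt x)]

-- the Int-level crux: Python xor commutes with % 2^n also on negatives
theorem pv_emod_ofNat (m : Nat) (n : Nat) : (m : Int) % ((2:Int) ^ n) = ((m % 2 ^ n : Nat) : Int) := by
  push_cast
  rfl

theorem pv_emod_negSucc (m : Nat) (n : Nat) :
    (-(m : Int) - 1) % ((2:Int) ^ n) = (((m % 2 ^ n) ^^^ (2 ^ n - 1) : Nat) : Int) := by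
  have hp : 0 < 2 ^ n := Nat.two_pow_pos n
  have h1 : m % 2 ^ n < 2 ^ n := Nat.mod_lt _ hp
  have hmask : (m % 2 ^ n) ^^^ (2 ^ n - 1) = 2 ^ n - 1 - m % 2 ^ n := pv_xor_mask n _ h1
  rw [hmask]
  have hcast : (((2:Nat) ^ n : Nat) : Int) = (2:Int) ^ n := by push_cast; ring
  have h2 : 2 ^ n * (m / 2 ^ n) + m % 2 ^ n = m := Nat.div_add_mod m (2 ^ n)
  have hm : (m : Int) = (((2:Nat) ^ n : Nat) : Int) * ((m / 2 ^ n : Nat) : Int) + ((m % 2 ^ n : Nat) : Int) := by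
    exact_mod_cast congrArg (fun t : Nat => (t : Int)) h2.symm
  have hc : ((2 ^ n - 1 - m % 2 ^ n : Nat) : Int)
      = (((2:Nat) ^ n : Nat) : Int) - 1 - ((m % 2 ^ n : Nat) : Int) := by omega
  have hdecomp : -(m : Int) - 1
      = ((2 ^ n - 1 - m % 2 ^ n : Nat) : Int)
        + (((2:Nat) ^ n : Nat) : Int) * (-((m / 2 ^ n : Nat) : Int) - 1) := by
    rw [hc]; linear_combination -hm
  rw [hdecomp, ← hcast, Int.add_mul_emod_self_left]
  exact Int.emod_eq_of_lt (by positivity) (by exact_mod_cast (by omega : (2 ^ n - 1 - m % 2 ^ n : Nat) < 2 ^ n))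

theorem pv_xor_cancel_pair (A B m : Nat) : (A ^^^ m) ^^^ (B ^^^ m) = A ^^^ B := by
  rw [Nat.xor_assoc, Nat.xor_comm B m, Nat.xor_xor_cancel_left]

theorem pv_bxor_emod (a b : Int) (n : Nat) :
    (PySem.Int.bxor a b) % ((2:Int) ^ n) =
      (((a % ((2:Int) ^ n)).toNat ^^^ (b % ((2:Int) ^ n)).toNat : Nat) : Int) := by
  have hmodn : ∀ m : Nat, ((m : Int) % ((2:Int) ^ n)).toNat = m % 2 ^ n := by
    intro m; rw [pv_emod_ofNat]; exact Int.toNat_natCast _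
  have hmodneg : ∀ m : Nat, ((-(m : Int) - 1) % ((2:Int) ^ n)).toNat = (m % 2 ^ n) ^^^ (2 ^ n - 1) := by
    intro m; rw [pv_emod_negSucc]; exact Int.toNat_natCast _
  simp only [PySem.Int.bxor]
  split_ifs with ha hb hb'
  · rcases Int.eq_ofNat_of_zero_le ha with ⟨ma, rfl⟩
    rcases Int.eq_ofNat_of_zero_le hb with ⟨mb, rfl⟩
    simp only [Int.toNat_natCast]
    rw [pv_emod_ofNat, pv_xor_mod_pow, hmodn, hmodn]
  · rcases Int.eq_ofNat_of_zero_le ha with ⟨ma, rfl⟩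
    obtain ⟨mb, rfl⟩ : ∃ m : Nat, b = -(m : Int) - 1 := ⟨(-b - 1).toNat, by omega⟩
    have hmb : (-(-(mb : Int) - 1) - 1).toNat = mb := by
      have h : (-(-(mb : Int) - 1) - 1) = (mb : Int) := by ring
      rw [h]; simp
    simp only [Int.toNat_natCast, hmb]
    rw [pv_emod_negSucc, pv_xor_mod_pow, hmodn, hmodneg]
    congr 1
    rw [Nat.xor_assoc]
  · rcases Int.eq_ofNat_of_zero_le hb' with ⟨mb, rfl⟩
    obtain ⟨ma, rfl⟩ : ∃ m : Nat, a = -(m : Int) - 1 := ⟨(-a - 1).toNat, by omega⟩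
    have hma : (-(-(ma : Int) - 1) - 1).toNat = ma := by
      have h : (-(-(ma : Int) - 1) - 1) = (ma : Int) := by ring
      rw [h]; simp
    simp only [Int.toNat_natCast, hma]
    rw [pv_emod_negSucc, pv_xor_mod_pow, hmodneg, hmodn]
    congr 1
    simp [Nat.xor_comm, Nat.xor_left_comm]
  · obtain ⟨ma, rfl⟩ : ∃ m : Nat, a = -(m : Int) - 1 := ⟨(-a - 1).toNat, by omega⟩
    obtain ⟨mb, rfl⟩ : ∃ m : Nat, b = -(m : Int) - 1 := ⟨(-b - 1).toNat, by omega⟩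
    have hma : (-(-(ma : Int) - 1) - 1).toNat = ma := by
      have h : (-(-(ma : Int) - 1) - 1) = (ma : Int) := by ring
      rw [h]; simp
    have hmb : (-(-(mb : Int) - 1) - 1).toNat = mb := by
      have h : (-(-(mb : Int) - 1) - 1) = (mb : Int) := by ring
      rw [h]; simp
    simp only [hma, hmb]
    rw [pv_emod_ofNat, pv_xor_mod_pow, hmodneg, hmodneg]
    congr 1
    rw [pv_xor_cancel_pair]

-- A's one step equals Source B's shift-form step on the 24-bit residue
theorem pv_modP (y : Int) : PySem.Int.mod y 16777216 = y % ((2:Int) ^ 24) := by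
  rw [PySem.Int.mod_eq_emod_of_pos (by norm_num)]
  norm_num

theorem pv_next_eq (x : Int) :
    pv_next x = ((b_step ((PySem.Int.mod x 16777216).toNat) : Nat) : Int) := by
  have hmask : bMASK = 2 ^ 24 - 1 := by norm_num [bMASK, bMOD]
  set v : Nat := (PySem.Int.mod x 16777216).toNat with hv
  have h1 := PySem.Int.mod_nonneg (a := x) (b := 16777216) (by norm_num)
  have h2 := PySem.Int.mod_lt (a := x) (b := 16777216) (by norm_num)
  have hvm : PySem.Int.mod x 16777216 = (v : Int) := (Int.toNat_of_nonneg h1).symm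
  have hveq : x % ((2:Int) ^ 24) = (v : Int) := by rw [← pv_modP, hvm]
  have hvlt : v < 2 ^ 24 := by omega
  have hs1 : pv_prune (pv_mix (x * 64) x) = (((v ^^^ (v <<< 6)) &&& (2 ^ 24 - 1) : Nat) : Int) := by
    rw [pv_mix, pv_prune, pv_modP, pv_bxor_emod]
    have e1 : x * 64 % ((2:Int) ^ 24) = ((v * 64 % 2 ^ 24 : Nat) : Int) := by
      rw [Int.mul_emod, hveq, ← pv_emod_ofNat]
      push_cast
      norm_num
    have h64 : (x * 64 % ((2:Int) ^ 24)).toNat = v * 64 % 2 ^ 24 := by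
      rw [e1]; exact Int.toNat_natCast _
    have hx : (x % ((2:Int) ^ 24)).toNat = v := by rw [hveq]; exact Int.toNat_natCast _
    rw [h64, hx]
    congr 1
    rw [Nat.and_two_pow_sub_one_eq_mod, pv_xor_mod_pow, Nat.shiftLeft_eq,
      Nat.mod_eq_of_lt hvlt, show (2:Nat) ^ 6 = 64 by norm_num]
    exact Nat.xor_comm _ _
  have L2 : ∀ w : Nat, pv_prune (pv_mix (PySem.Int.floordiv (w : Int) 32) (w : Int))
      = (((w ^^^ (w >>> 5)) &&& (2 ^ 24 - 1) : Nat) : Int) := by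
    intro w
    have hf : PySem.Int.floordiv (w : Int) 32 = ((w / 32 : Nat) : Int) := by
      exact_mod_cast PySem.Int.floordiv_natCast w 32
    rw [pv_mix, pv_prune, hf, PySem.Int.bxor_natCast, pv_modP, pv_emod_ofNat]
    congr 1
    rw [Nat.and_two_pow_sub_one_eq_mod, pv_xor_mod_pow, pv_xor_mod_pow,
      Nat.shiftRight_eq_div_pow, show (2:Nat) ^ 5 = 32 by norm_num]
    exact Nat.xor_comm _ _
  have L3 : ∀ w : Nat, pv_prune (pv_mix ((w : Int) * 2048) (w : Int))
      = (((w ^^^ (w <<< 11)) &&& (2 ^ 24 - 1) : Nat) : Int) := by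
    intro w
    have hm : ((w : Int) * 2048) = ((w * 2048 : Nat) : Int) := by push_cast; ring
    rw [pv_mix, pv_prune, hm, PySem.Int.bxor_natCast, pv_modP, pv_emod_ofNat]
    congr 1
    rw [Nat.and_two_pow_sub_one_eq_mod, pv_xor_mod_pow, pv_xor_mod_pow,
      Nat.shiftLeft_eq, show (2:Nat) ^ 11 = 2048 by norm_num]
    exact Nat.xor_comm _ _
  simp only [pv_next]
  rw [hs1, L2, L3]
  simp only [b_step, hmask]

theorem pv_inner_loop (n : Nat) (x : Int) :
    (List.range (n + 1)).foldl (fun s _ => pv_next s) x =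
      ((b_step^[n + 1] ((PySem.Int.mod x 16777216).toNat) : Nat) : Int) := by
  induction n with
  | zero => simp [List.range_one, pv_next_eq x]
  | succ n ih =>
    rw [List.range_succ, List.foldl_append, ih]
    simp only [List.foldl_cons, List.foldl_nil]
    rw [pv_next_eq]
    have hw : b_step^[n + 1] ((PySem.Int.mod x 16777216).toNat) < 2 ^ 24 := by
      rw [Function.iterate_succ_apply']
      exact pv_step_lt _
    have hmodw : (PySem.Int.mod ((b_step^[n + 1] ((PySem.Int.mod x 16777216).toNat) : Nat) : Int) 16777216).toNat
        = b_step^[n + 1] ((PySem.Int.mod x 16777216).toNat) := by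
      rw [pv_modP, pv_emod_ofNat, Int.toNat_natCast, Nat.mod_eq_of_lt hw]
    rw [hmodw, Function.iterate_succ_apply' b_step (n + 1)]

-- ===== VERDICT (by name: the statement is the Claim_ definition above) =====
theorem generate_secret_numbers_spec : Claim_equal_generate_secret_numbers := by
  intro xs _
  unfold Spec_generate_secret_numbers generate_secret_numbers generate_secret_numbers_alt
  rw [PySem.List.foldl_append_singleton_eq_map]
  simp only [List.nil_append]
  refine List.map_congr_left fun x _ => ?_
  have hin := pv_inner_loop 1999 x
  have h2000 : (1999 : Nat) + 1 = 2000 := by norm_num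
  rw [h2000] at hin
  rw [hin]
  have h1 := PySem.Int.mod_nonneg (a := x) (b := 16777216) (by norm_num)
  have h2 := PySem.Int.mod_lt (a := x) (b := 16777216) (by norm_num)
  have hvlt : (PySem.Int.mod x 16777216).toNat < 2 ^ 24 := by omega
  rw [pv_matpow_sem, pv_apply_identity _ hvlt, pv_iter_stepcols 2000 _ hvlt]
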